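-- pv_equiv track=rewrite | github.com/Nandu-yadav/daily_coding | Binary_searching/BS_on_answers/smallest_divisor_threshold.py | divisor_threshold1
-- ===== SOURCE A (Python) =====
-- import math
-- import math
--
-- def divisor_threshold1(arr,threshold):
--     maxi=max(arr)
--     low=1
--     high=maxi
--     ans=-1
--     while(low<=high):
--         mid=(low+high)//2
--         sum=0
--         for j in range(len(arr)):
--             sum += math.ceil(arr[j]/mid)
--         if sum<=threshold:
--             ans=mid
--             high=mid-1
--         else:
--             low=mid+1
--     return ans
-- ===== SOURCE B (Python) =====
-- def divisor_threshold1(arr, threshold):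
--     # A's value on mixed-sign inputs depends on the exact probe sequence, so an
--     # exact re-implementation must visit the same midpoints; B reorganises the
--     # search as a recursive descent with no running 'ans' (the deepest hit is
--     # propagated back, 'or' supplies the current midpoint when the left half has
--     # none) and replaces float math.ceil by exact integer ceiling -(-x // d).
--     def fits(d):
--         return -sum(-x // d for x in arr) <= threshold
--
--     def first_fit(lo, hi):
--         if lo > hi:
--             return None
--         mid = (lo + hi) // 2
--         if fits(mid):
--             return first_fit(lo, mid - 1) or mid
--         return first_fit(mid + 1, hi)
--
--     r = first_fit(1, max(arr))
--     return -1 if r is None else r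
-- ===== Notes on version B (the rewrite author's own statement) =====
-- stated objective: alternative
-- what changed: A's result on non-monotone (mixed-sign) inputs depends on its exact probe sequence, so B keeps the same midpoint probes but reorganises everything else: a recursive descent returning Option instead of the imperative low/high/ans state machine (the deepest hit propagates back, 'or' supplies the current midpoint), and the per-midpoint test uses exact integer ceiling -(-x//d) summed once and negated instead of accumulating float math.ceil(x/d) over indices.
import Mathlib
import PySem

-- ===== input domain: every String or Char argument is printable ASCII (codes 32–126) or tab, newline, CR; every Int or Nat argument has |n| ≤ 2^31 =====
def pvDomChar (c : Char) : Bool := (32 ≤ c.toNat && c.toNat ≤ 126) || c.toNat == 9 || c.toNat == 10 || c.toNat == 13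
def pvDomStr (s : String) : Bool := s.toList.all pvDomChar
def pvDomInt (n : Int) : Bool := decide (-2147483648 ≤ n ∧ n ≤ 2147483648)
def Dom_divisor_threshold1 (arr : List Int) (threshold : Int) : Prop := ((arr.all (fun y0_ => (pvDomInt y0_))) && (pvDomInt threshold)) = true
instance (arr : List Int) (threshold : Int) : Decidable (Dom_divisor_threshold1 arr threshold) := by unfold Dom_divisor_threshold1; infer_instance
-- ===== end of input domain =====

-- A's result on mixed-sign inputs depends on its exact probe sequence, so B keeps the same
-- midpoint probes but reorganises everything else: a recursive Option-returning descent with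
-- no low/high/ans state machine, and an exact integer ceiling sum instead of float math.ceil
-- accumulated over indices; objective: alternative (same cost, different decomposition).

-- ===== PORT A =====
-- math.ceil(x / m) for m > 0: exact on Dom (|x| ≤ 2^31 < 2^53, so CPython's float division rounds to a value with the exact ceiling)
def pyCeil (x m : Int) : Int := -(PySem.Int.floordiv (-x) m)

-- the inner 'for j in range(len(arr)): sum += math.ceil(arr[j]/mid)' loop
def sumCeilA (arr : List Int) (m : Int) : Int :=
  (PySem.List.pyRange 0 (PySem.List.len arr) 1).foldl
    (fun s j => s + pyCeil (PySem.List.pyGetD arr j 0) m) 0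

def aloop (arr : List Int) (threshold low high ans : Int) : Int :=
  if h : low ≤ high then
    let mid := PySem.Int.floordiv (low + high) 2
    if sumCeilA arr mid ≤ threshold then
      aloop arr threshold low (mid - 1) mid
    else
      aloop arr threshold (mid + 1) high ans
  else ans
termination_by (high - low + 1).toNat
decreasing_by
  · have hm := PySem.Int.floordiv_two_mid_bounds h; omega
  · have hm := PySem.Int.floordiv_two_mid_bounds h; omega

def divisor_threshold1 (arr : List Int) (threshold : Int) : Int :=
  aloop arr threshold 1 ((PySem.List.max? arr (fun x => x)).getD 0) (-1)

-- ===== PORT B =====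
-- fits(d): -sum(-x // d for x in arr) <= threshold  (exact integer ceiling, one negated sum)
def fitsB (arr : List Int) (threshold d : Int) : Bool :=
  -((arr.map (fun x => PySem.Int.floordiv (-x) d)).sum) ≤ threshold

-- first_fit(lo, hi): recursive descent; the deepest hit propagates back, 'or' supplies mid
def firstFit (arr : List Int) (threshold lo hi : Int) : Option Int :=
  if h : lo ≤ hi then
    let mid := PySem.Int.floordiv (lo + hi) 2
    if fitsB arr threshold mid then
      match firstFit arr threshold lo (mid - 1) with
      | some r => some r
      | none => some mid
    else firstFit arr threshold (mid + 1) hi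
  else none
termination_by (hi - lo + 1).toNat
decreasing_by
  · have hm := PySem.Int.floordiv_two_mid_bounds h; omega
  · have hm := PySem.Int.floordiv_two_mid_bounds h; omega

def divisor_threshold1_alt (arr : List Int) (threshold : Int) : Int :=
  match firstFit arr threshold 1 ((PySem.List.max? arr (fun x => x)).getD 0) with
  | none => -1
  | some r => r

-- ===== PRECONDITION & SPEC =====
-- Pre_ excludes only the empty list, on which Python's max(arr) raises ValueError in both programs.
def Pre_divisor_threshold1 (arr : List Int) (threshold : Int) : Prop := arr ≠ []
instance (arr : List Int) (threshold : Int) : Decidable (Pre_divisor_threshold1 arr threshold) := by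
  unfold Pre_divisor_threshold1; infer_instance

def pvWitness_divisor_threshold1 : List Int × Int := ([3, 1, 4, 9], 6)

def Spec_divisor_threshold1 (arr : List Int) (threshold : Int) (out : Int) : Prop := out = divisor_threshold1_alt arr threshold
instance (arr : List Int) (threshold : Int) (out : Int) : Decidable (Spec_divisor_threshold1 arr threshold out) := by unfold Spec_divisor_threshold1; infer_instance

-- ===== CLAIM (what is proved, stated in full; the proofs are below) =====
def Claim_equal_divisor_threshold1 : Prop := ∀ (arr : List Int) (threshold : Int), Dom_divisor_threshold1 arr threshold → Pre_divisor_threshold1 arr threshold → Spec_divisor_threshold1 arr threshold (divisor_threshold1 arr threshold)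

-- ===== LEMMAS AND PROOFS =====

-- A's indexed float-ceil accumulation equals B's negated floor-division sum
theorem sumCeilA_eq_fits (arr : List Int) (m t : Int) :
    (sumCeilA arr m ≤ t) = (fitsB arr t m = true) := by
  unfold sumCeilA fitsB
  rw [PySem.List.foldl_pyRange_pyGetD arr 0 (fun s a => s + pyCeil a m) 0 (by omega)]
  have hsum : ∀ (l : List Int) (c : Int), l.foldl (fun s a => s + pyCeil a m) c
      = c - (l.map (fun x => PySem.Int.floordiv (-x) m)).sum := by
    intro l
    induction l with
    | nil => intro c; simp
    | cons a tl ih =>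
      intro c
      rw [List.foldl_cons, ih, List.map_cons, List.sum_cons]
      unfold pyCeil
      ring
  rw [show Int.toNat 0 = 0 from rfl, List.drop_zero, hsum arr 0]
  simp

-- the two recursions walk the same midpoints; ans plays the role of getD's default
theorem aloop_eq_firstFit (arr : List Int) (t lo hi ans : Int) :
    aloop arr t lo hi ans = (firstFit arr t lo hi).getD ans := by
  rw [aloop, firstFit]
  by_cases h : lo ≤ hi
  · rw [dif_pos h, dif_pos h]
    have hm := PySem.Int.floordiv_two_mid_bounds h
    simp only [sumCeilA_eq_fits arr _ t]
    by_cases hok : fitsB arr t (PySem.Int.floordiv (lo + hi) 2) = true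
    · rw [if_pos hok, if_pos hok,
        aloop_eq_firstFit arr t lo (PySem.Int.floordiv (lo + hi) 2 - 1)
          (PySem.Int.floordiv (lo + hi) 2)]
      cases firstFit arr t lo (PySem.Int.floordiv (lo + hi) 2 - 1) <;> simp
    · rw [if_neg hok, if_neg hok]
      exact aloop_eq_firstFit arr t (PySem.Int.floordiv (lo + hi) 2 + 1) hi ans
  · rw [dif_neg h, dif_neg h]
    simp
termination_by (hi - lo + 1).toNat
decreasing_by
  · omega
  · omega

-- ===== VERDICT (by name: the statement is the Claim_ definition above) =====
theorem divisor_threshold1_spec : Claim_equal_divisor_threshold1 := by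
  intro arr t _hdom _hpre
  unfold Spec_divisor_threshold1 divisor_threshold1 divisor_threshold1_alt
  rw [aloop_eq_firstFit]
  cases firstFit arr t 1 ((PySem.List.max? arr (fun x => x)).getD 0) <;> simp
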